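-- pv_equiv track=rewrite | github.com/zzeiidann/PT-DEC-Upgraded | FNNJST/model.py | map_texts_to_clusters
-- ===== SOURCE A (Python) =====
-- from collections import Counter
--
-- def map_texts_to_clusters(texts, cluster_assignments):
--     clusters = {}
--
--     n = min(len(texts), len(cluster_assignments))
--
--     for i in range(n):
--         cluster = int(cluster_assignments[i])
--         if cluster not in clusters:
--             clusters[cluster] = []
--         clusters[cluster].append(texts[i])
--
--     cluster_common_words = {}
--     for cluster, cluster_texts in clusters.items():
--         all_text = " ".join(cluster_texts)
--
--         words = all_text.lower().split()
--
--         stopwords = set(['dan', 'yang', 'adalah', 'dari', 'dengan', 'untuk', 'ini', 'itu', 'pada', 'the', 'a', 'an', 'is', 'of', 'in', 'to', 'and'])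
--         filtered_words = [word for word in words if word not in stopwords and len(word) > 2]
--
--         word_counts = Counter(filtered_words)
--
--         top_words = word_counts.most_common(20)
--         cluster_common_words[cluster] = top_words
--
--     return clusters, cluster_common_words
-- ===== SOURCE B (Python) =====
-- from collections import Counter
--
-- _STOPWORDS = {'dan', 'yang', 'adalah', 'dari', 'dengan', 'untuk', 'ini', 'itu',
--               'pada', 'the', 'a', 'an', 'is', 'of', 'in', 'to', 'and'}
--
--
-- def map_texts_to_clusters(texts, cluster_assignments):
--     # One fused pass: group texts and count their words per cluster at the same
--     # time (no joined intermediate string, no second pass over the texts).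
--     clusters = {}
--     counters = {}
--     for text, label in zip(texts, cluster_assignments):
--         c = int(label)
--         if c in clusters:
--             clusters[c].append(text)
--         else:
--             clusters[c] = [text]
--             counters[c] = Counter()
--         counters[c].update(
--             w for w in text.lower().split()
--             if w not in _STOPWORDS and len(w) > 2)
--     cluster_common_words = {c: cnt.most_common(20) for c, cnt in counters.items()}
--     return clusters, cluster_common_words
-- ===== Notes on version B (the rewrite author's own statement) =====
-- stated objective: alternative
-- what changed: B fuses A's two phases into one pass over zip(texts, cluster_assignments) that grows each cluster's text list and updates a per-cluster Counter from each text's own lowered/filtered words, eliminating A's per-cluster join into one big string and its second pass over the grouped texts; the stopword set is hoisted out as a module constant.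
import Mathlib
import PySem

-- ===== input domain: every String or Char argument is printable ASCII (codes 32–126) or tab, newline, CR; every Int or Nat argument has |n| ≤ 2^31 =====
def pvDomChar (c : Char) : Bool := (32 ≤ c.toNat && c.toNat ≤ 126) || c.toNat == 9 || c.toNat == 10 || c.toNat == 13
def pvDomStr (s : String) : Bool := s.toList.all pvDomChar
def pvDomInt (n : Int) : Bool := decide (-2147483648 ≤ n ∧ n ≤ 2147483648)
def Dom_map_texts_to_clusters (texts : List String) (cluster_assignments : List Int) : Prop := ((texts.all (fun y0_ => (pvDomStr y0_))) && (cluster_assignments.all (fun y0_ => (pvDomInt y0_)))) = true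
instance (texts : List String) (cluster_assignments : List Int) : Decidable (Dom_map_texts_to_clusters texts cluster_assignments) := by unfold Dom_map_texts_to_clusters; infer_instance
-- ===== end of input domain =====

-- B fuses A's group-then-join-then-count two-phase structure into one pass that groups each
-- text and updates a per-cluster word counter directly from that text (objective: alternative).

-- ===== PORT A =====
-- the stopword list A builds inside its per-cluster loop
def pvStopList : List String :=
  ["dan", "yang", "adalah", "dari", "dengan", "untuk", "ini", "itu", "pada",
   "the", "a", "an", "is", "of", "in", "to", "and"]

def map_texts_to_clusters (texts : List String) (cluster_assignments : List Int) :
    (List (Int × List String)) × (List (Int × List (String × Int))) :=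
  -- n = min(len(texts), len(cluster_assignments))
  let n : Int := min (texts.length : Int) (cluster_assignments.length : Int)
  -- for i in range(n): group texts[i] under int(cluster_assignments[i])
  -- (int() on an int is the identity; every index is in range, so pyGetD's defaults are never used)
  let clusters : PySem.Dict Int (List String) :=
    (PySem.List.pyRange 0 n 1).foldl
      (fun d i =>
        let cluster : Int := PySem.List.pyGetD cluster_assignments i 0
        let d1 := if d.contains cluster then d else d.insert cluster []
        d1.modify cluster [] (fun l => l ++ [PySem.List.pyGetD texts i ""]))
      PySem.Dict.empty
  -- for cluster, cluster_texts in clusters.items(): join, lower, split, filter, Counter, most_common(20)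
  let cluster_common_words : PySem.Dict Int (List (String × Int)) :=
    clusters.items.foldl
      (fun m p =>
        let all_text := PySem.Str.join " " p.2
        let words := PySem.Str.split₀ (PySem.Str.lower all_text)
        let stopwords : PySem.Set String := PySem.Set.ofList pvStopList
        let filtered_words := words.filter (fun w => !(stopwords.contains w) && 2 < PySem.Str.len w)
        let word_counts := PySem.Dict.counter filtered_words
        -- most_common(20) = sorted(items, key=count, reverse=True)[:20] (stable)
        let top_words := (PySem.List.sorted word_counts.items (fun q => q.2) true).take 20
        m.insert p.1 top_words)
      PySem.Dict.empty
  (clusters.items, cluster_common_words.items)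

-- ===== PORT B =====
-- the module-level stopword set of Source B
def pvStopSet : PySem.Set String := PySem.Set.ofList pvStopList

-- [w for w in text.lower().split() if w not in _STOPWORDS and len(w) > 2]
def pvFilteredWords (text : String) : List String :=
  (PySem.Str.split₀ (PySem.Str.lower text)).filter
    (fun w => !(pvStopSet.contains w) && 2 < PySem.Str.len w)

def map_texts_to_clusters_alt (texts : List String) (cluster_assignments : List Int) :
    (List (Int × List String)) × (List (Int × List (String × Int))) :=
  -- one fused pass over zip(texts, cluster_assignments)
  let st : PySem.Dict Int (List String) × PySem.Dict Int (PySem.Dict String Int) :=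
    (texts.zip cluster_assignments).foldl
      (fun st p =>
        let c : Int := p.2   -- int(label) on an int is the identity
        let (cl, co) :=
          if st.1.contains c then (st.1.modify c [] (fun l => l ++ [p.1]), st.2)
          else (st.1.insert c [p.1], st.2.insert c PySem.Dict.empty)
        -- counters[c].update(filtered words of this text)
        let co := co.modify c PySem.Dict.empty
          (fun cnt => (pvFilteredWords p.1).foldl (fun d w => d.modify w 0 (fun k => k + 1)) cnt)
        (cl, co))
      (PySem.Dict.empty, PySem.Dict.empty)
  -- {c: cnt.most_common(20) for c, cnt in counters.items()}
  let common : PySem.Dict Int (List (String × Int)) :=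
    st.2.items.foldl
      (fun m q => m.insert q.1 ((PySem.List.sorted q.2.items (fun r => r.2) true).take 20))
      PySem.Dict.empty
  (st.1.items, common.items)

-- ===== PRECONDITION & SPEC =====
def Spec_map_texts_to_clusters (texts : List String) (cluster_assignments : List Int) (out : (List (Int × List String)) × (List (Int × List (String × Int)))) : Prop := out = map_texts_to_clusters_alt texts cluster_assignments
instance (texts : List String) (cluster_assignments : List Int) (out : (List (Int × List String)) × (List (Int × List (String × Int)))) : Decidable (Spec_map_texts_to_clusters texts cluster_assignments out) := by unfold Spec_map_texts_to_clusters; infer_instance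

-- ===== CLAIM (what is proved, stated in full; the proofs are below) =====
def Claim_equal_map_texts_to_clusters : Prop := ∀ (texts : List String) (cluster_assignments : List Int), Dom_map_texts_to_clusters texts cluster_assignments → Spec_map_texts_to_clusters texts cluster_assignments (map_texts_to_clusters texts cluster_assignments)

-- ===== LEMMAS AND PROOFS =====

-- the word list A extracts from a cluster's texts, and its counter
def pvWordsOf (ts : List String) : List String :=
  (PySem.Str.split₀ (PySem.Str.lower (PySem.Str.join " " ts))).filter
    (fun w => !(pvStopSet.contains w) && 2 < PySem.Str.len w)

def pvCounterOf (ts : List String) : PySem.Dict String Int :=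
  PySem.Dict.counter (pvWordsOf ts)

-- ---- A's range(n)-with-indexing loop is the loop over the zipped lists ----

lemma pvPyRange_shift : ∀ (n : Nat) (a b : Int), (b - a).toNat = n →
    PySem.List.pyRange (a + 1) (b + 1) 1 = (PySem.List.pyRange a b 1).map (fun i => i + 1) := by
  intro n
  induction n with
  | zero =>
    intro a b h
    have hba : b ≤ a := by omega
    rw [PySem.List.pyRange_one_eq_nil hba, PySem.List.pyRange_one_eq_nil (by omega)]
    rfl
  | succ n ih =>
    intro a b h
    have hab : a < b := by omega
    rw [PySem.List.pyRange_one_cons hab, PySem.List.pyRange_one_cons (by omega : a + 1 < b + 1)]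
    simp only [List.map_cons]
    rw [ih (a + 1) b (by omega)]

lemma pvFoldl_idx_zip {σ : Type} (f : σ → String → Int → σ) :
    ∀ (ts : List String) (cs : List Int) (init : σ),
      (PySem.List.pyRange 0 (min (ts.length : Int) (cs.length : Int)) 1).foldl
        (fun st i => f st (PySem.List.pyGetD ts i "") (PySem.List.pyGetD cs i 0)) init
      = (ts.zip cs).foldl (fun st p => f st p.1 p.2) init := by
  intro ts
  induction ts with
  | nil =>
    intro cs init
    simp only [List.length_nil, Nat.cast_zero]
    rw [PySem.List.pyRange_one_eq_nil (by positivity)]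
    simp
  | cons t ts ih =>
    intro cs init
    cases cs with
    | nil =>
      rw [PySem.List.pyRange_one_eq_nil (by simp)]
      simp
    | cons c cs =>
      have hmin : min ((t :: ts).length : Int) ((c :: cs).length : Int)
          = min (ts.length : Int) (cs.length : Int) + 1 := by
        simp only [List.length_cons]; push_cast; omega
      rw [hmin, PySem.List.pyRange_one_cons (by positivity)]
      rw [List.foldl_cons]
      have h0t : PySem.List.pyGetD (t :: ts) 0 "" = t := by
        simp [PySem.List.pyGetD]
      have h0c : PySem.List.pyGetD (c :: cs) 0 0 = c := by
        simp [PySem.List.pyGetD]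
      rw [h0t, h0c]
      rw [show (0 : Int) + 1 = 0 + 1 from rfl,
        pvPyRange_shift (min (ts.length : Int) (cs.length : Int)).toNat 0
          (min (ts.length : Int) (cs.length : Int)) (by omega)]
      rw [List.foldl_map]
      have hcong : ∀ (st : σ) (i : Int), i ∈ PySem.List.pyRange 0 (min (ts.length : Int) (cs.length : Int)) 1 →
          f st (PySem.List.pyGetD (t :: ts) (i + 1) "") (PySem.List.pyGetD (c :: cs) (i + 1) 0)
            = f st (PySem.List.pyGetD ts i "") (PySem.List.pyGetD cs i 0) := by
        intro st i hi
        have h0i : 0 ≤ i := by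
          have := (PySem.List.mem_pyRange_one).1 hi
          omega
        obtain ⟨k, rfl⟩ : ∃ k : Nat, i = (k : Int) := ⟨i.toNat, by omega⟩
        have hc1 : PySem.List.pyGetD (t :: ts) ((k : Int) + 1) "" = PySem.List.pyGetD ts k "" := by
          simp [PySem.List.pyGetD, PySem.List.pyGet?_cons_succ]
        have hc2 : PySem.List.pyGetD (c :: cs) ((k : Int) + 1) 0 = PySem.List.pyGetD cs k 0 := by
          simp [PySem.List.pyGetD, PySem.List.pyGet?_cons_succ]
        rw [hc1, hc2]
      rw [PySem.List.foldl_congr_mem _ _ _ _ hcong]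
      rw [ih cs (f init t c)]
      simp

-- ---- str.split() of a " "-join is the concatenation of the per-string splits ----

lemma pvGoNil (cur : List Char) (acc : List (List Char)) :
    PySem.Chars.split₀.go [] cur acc
      = if cur.isEmpty then acc.reverse else (cur.reverse :: acc).reverse := rfl

lemma pvGoCons (c : Char) (rest cur : List Char) (acc : List (List Char)) :
    PySem.Chars.split₀.go (c :: rest) cur acc
      = if PySem.Chars.isspace c then
          (if cur.isEmpty then PySem.Chars.split₀.go rest [] acc
           else PySem.Chars.split₀.go rest [] (cur.reverse :: acc))
        else PySem.Chars.split₀.go rest (c :: cur) acc := rfl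

lemma pvGoAcc : ∀ (s cur : List Char) (acc : List (List Char)),
    PySem.Chars.split₀.go s cur acc = acc.reverse ++ PySem.Chars.split₀.go s cur [] := by
  intro s
  induction s with
  | nil =>
    intro cur acc
    rw [pvGoNil, pvGoNil]
    by_cases h : cur.isEmpty <;> simp [h]
  | cons c rest ih =>
    intro cur acc
    rw [pvGoCons, pvGoCons]
    by_cases hs : PySem.Chars.isspace c
    · by_cases hc : cur.isEmpty
      · simp only [hs, hc, if_pos]
        exact ih [] acc
      · simp only [hs, hc, if_true, if_neg, Bool.false_eq_true, not_false_iff]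
        rw [ih [] (cur.reverse :: acc), ih [] [cur.reverse]]
        simp
    · simp only [hs, Bool.false_eq_true, if_false]
      exact ih (c :: cur) acc

lemma pvGoAppendSpace : ∀ (xs ys cur : List Char) (acc : List (List Char)),
    PySem.Chars.split₀.go (xs ++ ' ' :: ys) cur acc
      = PySem.Chars.split₀.go xs cur acc ++ PySem.Chars.split₀.go ys [] [] := by
  intro xs
  induction xs with
  | nil =>
    intro ys cur acc
    simp only [List.nil_append]
    rw [pvGoCons, pvGoNil]
    have hsp : PySem.Chars.isspace ' ' = true := by decide
    simp only [hsp, if_true]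
    by_cases hc : cur.isEmpty
    · rw [if_pos hc, if_pos hc, pvGoAcc ys [] acc]
    · rw [if_neg hc, if_neg hc, pvGoAcc ys [] (cur.reverse :: acc)]
  | cons c rest ih =>
    intro ys cur acc
    simp only [List.cons_append]
    rw [pvGoCons, pvGoCons]
    by_cases hs : PySem.Chars.isspace c
    · by_cases hc : cur.isEmpty <;> simp [hs, hc, ih]
    · simp [hs, ih]

lemma pvSplitAppendSpace (xs ys : List Char) :
    PySem.Chars.split₀ (xs ++ ' ' :: ys) = PySem.Chars.split₀ xs ++ PySem.Chars.split₀ ys := by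
  simp only [PySem.Chars.split₀]
  exact pvGoAppendSpace xs ys [] []

lemma pvCharsWordsJoin : ∀ (ls : List (List Char)),
    PySem.Chars.split₀ (PySem.Chars.lower (PySem.Chars.join [' '] ls))
      = ls.flatMap (fun l => PySem.Chars.split₀ (PySem.Chars.lower l)) := by
  intro ls
  induction ls with
  | nil => simp [PySem.Chars.join_nil]; rfl
  | cons l rest ih =>
    cases rest with
    | nil => simp [PySem.Chars.join_singleton]
    | cons l' rest' =>
      rw [PySem.Chars.join_cons_cons]
      have hsp : PySem.Chars.lowerChar ' ' = ' ' := by decide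
      have h1 : PySem.Chars.lower (l ++ [' '] ++ PySem.Chars.join [' '] (l' :: rest'))
          = PySem.Chars.lower l ++ ' ' :: PySem.Chars.lower (PySem.Chars.join [' '] (l' :: rest')) := by
        simp [PySem.Chars.lower, hsp]
      rw [h1, pvSplitAppendSpace, ih]
      simp

lemma pvStrWordsJoin (ts : List String) :
    PySem.Str.split₀ (PySem.Str.lower (PySem.Str.join " " ts))
      = ts.flatMap (fun t => PySem.Str.split₀ (PySem.Str.lower t)) := by
  have hdef : ∀ s : String, PySem.Str.split₀ s = (PySem.Chars.split₀ s.toList).map String.ofList := by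
    intro s; rfl
  rw [hdef]
  have h2 : (PySem.Str.lower (PySem.Str.join " " ts)).toList
      = PySem.Chars.lower (PySem.Chars.join [' '] (ts.map String.toList)) := by
    rw [PySem.Str.toList_lower, PySem.Str.toList_join]
    rfl
  rw [h2, pvCharsWordsJoin]
  rw [List.flatMap_map, List.map_flatMap]
  apply List.flatMap_congr
  intro x _
  rw [hdef, PySem.Str.toList_lower]

lemma pvWordsOf_append_singleton (ts : List String) (t : String) :
    pvWordsOf (ts ++ [t]) = pvWordsOf ts ++ pvFilteredWords t := by
  simp only [pvWordsOf, pvFilteredWords, pvStrWordsJoin, List.flatMap_append,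
    List.filter_append, List.flatMap_cons, List.flatMap_nil, List.append_nil]

lemma pvCounterOf_append_singleton (ts : List String) (t : String) :
    pvCounterOf (ts ++ [t])
      = (pvFilteredWords t).foldl (fun d w => d.modify w 0 (fun k => k + 1)) (pvCounterOf ts) := by
  rw [pvCounterOf, pvWordsOf_append_singleton, pvCounterOf]
  rw [PySem.Dict.counter_eq_foldl, PySem.Dict.counter_eq_foldl, List.foldl_append]

lemma pvCounterOf_nil : pvCounterOf [] = PySem.Dict.empty := by rfl

-- ---- association-list alignment between the cluster dict and the counter dict ----

lemma pvGetD_map_items {α β : Type} (f : α → β) (c : Int) (d0 : α) :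
    ∀ (l : List (Int × α)),
      (PySem.Dict.mk (l.map (fun p => (p.1, f p.2)))).getD c (f d0)
        = f ((PySem.Dict.mk l).getD c d0) := by
  intro l
  induction l with
  | nil => simp [PySem.Dict.getD, PySem.Dict.get?]
  | cons p rest ih =>
    simp only [List.map_cons]
    rw [PySem.Dict.getD_eq_get?_getD, PySem.Dict.getD_eq_get?_getD] at *
    rw [PySem.Dict.get?_mk_cons, PySem.Dict.get?_mk_cons]
    by_cases h : p.1 == c
    · simp [h]
    · simp only [h, Bool.false_eq_true, if_false]
      exact ih

lemma pvInsert_insert_absent {ν : Type} (d : PySem.Dict Int ν) (c : Int) (v w : ν)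
    (h : d.contains c = false) : (d.insert c v).insert c w = d.insert c w := by
  apply PySem.Dict.ext
  rw [PySem.Dict.items_insert_of_contains _ _ (PySem.Dict.contains_insert_self d c v),
    PySem.Dict.items_insert_of_not_contains _ _ h,
    PySem.Dict.items_insert_of_not_contains _ _ h]
  rw [List.map_append]
  congr 1
  · nth_rewrite 2 [show d.items = d.items.map id from (List.map_id d.items).symm]
    apply List.map_congr_left
    intro p hp
    have hne : (p.1 == c) = false := by
      by_contra hcon
      have hpc : p.1 = c := eq_of_beq (by revert hcon; cases h' : (p.1 == c) <;> simp)
      have hct : d.contains c = true := by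
        simp only [PySem.Dict.contains, List.any_eq_true]
        exact ⟨p, hp, by simp [hpc]⟩
      rw [hct] at h; exact absurd h (by simp)
    simp [hne]
  · simp

lemma pvContains_map_rel {α β : Type} (f : α → β) (cl : List (Int × α)) (x : Int) :
    (PySem.Dict.mk (cl.map (fun p => (p.1, f p.2)))).contains x = (PySem.Dict.mk cl).contains x := by
  simp only [PySem.Dict.contains, List.any_map]
  rfl

-- ---- the fused-loop invariant: B's counter dict mirrors A's cluster dict entrywise ----

set_option maxHeartbeats 1000000 in
lemma pvLoopInv :
    ∀ (l : List (String × Int)) (cl : PySem.Dict Int (List String))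
      (co : PySem.Dict Int (PySem.Dict String Int)),
      co.items = cl.items.map (fun p => (p.1, pvCounterOf p.2)) →
      (l.foldl
          (fun d p =>
            let d1 := if d.contains p.2 then d else d.insert p.2 []
            d1.modify p.2 [] (fun ll => ll ++ [p.1])) cl
        = (l.foldl
            (fun st p =>
              let c : Int := p.2
              let q :=
                if st.1.contains c then (st.1.modify c [] (fun ll => ll ++ [p.1]), st.2)
                else (st.1.insert c [p.1], st.2.insert c PySem.Dict.empty)
              (q.1, q.2.modify c PySem.Dict.empty
                (fun cnt => (pvFilteredWords p.1).foldl
                  (fun d w => d.modify w 0 (fun k => k + 1)) cnt))) (cl, co)).1)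
      ∧ ((l.foldl
            (fun st p =>
              let c : Int := p.2
              let q :=
                if st.1.contains c then (st.1.modify c [] (fun ll => ll ++ [p.1]), st.2)
                else (st.1.insert c [p.1], st.2.insert c PySem.Dict.empty)
              (q.1, q.2.modify c PySem.Dict.empty
                (fun cnt => (pvFilteredWords p.1).foldl
                  (fun d w => d.modify w 0 (fun k => k + 1)) cnt))) (cl, co)).2.items
          = (l.foldl
              (fun d p =>
                let d1 := if d.contains p.2 then d else d.insert p.2 []
                d1.modify p.2 [] (fun ll => ll ++ [p.1])) cl).items.map
              (fun p => (p.1, pvCounterOf p.2))) := by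
  intro l
  induction l with
  | nil => intro cl co h; exact ⟨rfl, h⟩
  | cons p rest ih =>
    intro cl co h
    simp only [List.foldl_cons]
    have hco : co = PySem.Dict.mk (cl.items.map (fun p => (p.1, pvCounterOf p.2))) :=
      PySem.Dict.ext h
    have hcontains : co.contains p.2 = cl.contains p.2 := by
      rw [hco]
      exact pvContains_map_rel pvCounterOf cl.items p.2
    have hgetD : co.getD p.2 PySem.Dict.empty = pvCounterOf (cl.getD p.2 []) := by
      rw [hco, ← pvCounterOf_nil]
      exact pvGetD_map_items pvCounterOf p.2 [] cl.items
    set g : PySem.Dict String Int → PySem.Dict String Int :=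
      fun cnt => (pvFilteredWords p.1).foldl (fun d w => d.modify w 0 (fun k => k + 1)) cnt with hg
    by_cases hb : cl.contains p.2
    · -- existing cluster
      simp only [hb, if_true]
      apply ih
      simp only [PySem.Dict.modify]
      rw [PySem.Dict.items_insert_of_contains _ _ (by rw [hcontains]; exact hb),
        PySem.Dict.items_insert_of_contains _ _ hb, h, List.map_map, List.map_map]
      apply List.map_congr_left
      intro q hq
      by_cases hqc : (q.1 == p.2) = true
      · simp only [Function.comp, hqc, if_true]
        rw [hgetD, pvCounterOf_append_singleton]
      · simp only [Function.comp, hqc]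
        simp
    · -- new cluster
      have hb' : cl.contains p.2 = false := by
        cases hx : cl.contains p.2
        · rfl
        · exact absurd hx hb
      simp only [hb', Bool.false_eq_true, if_false]
      have hstepA : (cl.insert p.2 []).modify p.2 [] (fun ll => ll ++ [p.1])
          = cl.insert p.2 [p.1] := by
        simp only [PySem.Dict.modify, PySem.Dict.getD_insert_self, List.nil_append]
        exact pvInsert_insert_absent cl p.2 [] [p.1] hb'
      have hstepB : (co.insert p.2 PySem.Dict.empty).modify p.2 PySem.Dict.empty g
          = co.insert p.2 (g PySem.Dict.empty) := by
        simp only [PySem.Dict.modify, PySem.Dict.getD_insert_self]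
        exact pvInsert_insert_absent co p.2 PySem.Dict.empty (g PySem.Dict.empty)
          (by rw [hcontains]; exact hb')
      rw [hstepA, hstepB]
      apply ih
      rw [PySem.Dict.items_insert_of_not_contains _ _ (by rw [hcontains]; exact hb'),
        PySem.Dict.items_insert_of_not_contains _ _ hb', h, List.map_append]
      have hge : g PySem.Dict.empty = pvCounterOf [p.1] := by
        have h1 := pvCounterOf_append_singleton [] p.1
        rw [List.nil_append, pvCounterOf_nil] at h1
        exact h1.symm
      rw [List.map_cons, List.map_nil, hge]

-- ---- the second phase: A's per-cluster recount equals B's map over the stored counters ----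

lemma pvStage2 (l : List (Int × List String)) :
    l.foldl
        (fun m p => m.insert p.1
          ((PySem.List.sorted
              (PySem.Dict.counter
                ((PySem.Str.split₀ (PySem.Str.lower (PySem.Str.join " " p.2))).filter
                  (fun w => !((PySem.Set.ofList pvStopList).contains w) && 2 < PySem.Str.len w))).items
              (fun q => q.2) true).take 20))
        PySem.Dict.empty
      = (l.map (fun p => (p.1, pvCounterOf p.2))).foldl
          (fun m q => m.insert q.1 ((PySem.List.sorted q.2.items (fun r => r.2) true).take 20))
          PySem.Dict.empty := by
  rw [List.foldl_map]
  rfl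

-- ===== VERDICT (by name: the statement is the Claim_ definition above) =====
theorem map_texts_to_clusters_spec : Claim_equal_map_texts_to_clusters := by
  intro texts cas _
  show map_texts_to_clusters texts cas = map_texts_to_clusters_alt texts cas
  have hzip := pvFoldl_idx_zip
    (fun d text cluster =>
      (if PySem.Dict.contains d cluster then d else d.insert cluster []).modify cluster []
        (fun ll => ll ++ [text]))
    texts cas PySem.Dict.empty
  have hinv := pvLoopInv (texts.zip cas) PySem.Dict.empty PySem.Dict.empty rfl
  have h1 : (map_texts_to_clusters texts cas).1 = (map_texts_to_clusters_alt texts cas).1 :=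
    congrArg PySem.Dict.items (hzip.trans hinv.1)
  have hitems :
      ((texts.zip cas).foldl
          (fun st (p : String × Int) =>
            let c : Int := p.2
            let q :=
              if st.1.contains c then (st.1.modify c [] (fun ll => ll ++ [p.1]), st.2)
              else (st.1.insert c [p.1], st.2.insert c PySem.Dict.empty)
            (q.1, q.2.modify c PySem.Dict.empty
              (fun cnt => (pvFilteredWords p.1).foldl
                (fun d w => d.modify w 0 (fun k => k + 1)) cnt)))
          (PySem.Dict.empty, PySem.Dict.empty)).2.items
        = ((PySem.List.pyRange 0 (min (texts.length : Int) (cas.length : Int)) 1).foldl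
            (fun d i =>
              let cluster : Int := PySem.List.pyGetD cas i 0
              let d1 := if d.contains cluster then d else d.insert cluster []
              d1.modify cluster [] (fun ll => ll ++ [PySem.List.pyGetD texts i ""]))
            PySem.Dict.empty).items.map (fun p => (p.1, pvCounterOf p.2)) := by
    rw [hinv.2]
    exact congrArg (fun d => (PySem.Dict.items d).map (fun p => (p.1, pvCounterOf p.2))) hzip.symm
  have hdicts :
      ((PySem.List.pyRange 0 (min (texts.length : Int) (cas.length : Int)) 1).foldl
          (fun d i =>
            let cluster : Int := PySem.List.pyGetD cas i 0
            let d1 := if d.contains cluster then d else d.insert cluster []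
            d1.modify cluster [] (fun ll => ll ++ [PySem.List.pyGetD texts i ""]))
          PySem.Dict.empty).items.foldl
        (fun m p => m.insert p.1
          ((PySem.List.sorted
              (PySem.Dict.counter
                ((PySem.Str.split₀ (PySem.Str.lower (PySem.Str.join " " p.2))).filter
                  (fun w => !((PySem.Set.ofList pvStopList).contains w) && 2 < PySem.Str.len w))).items
              (fun q => q.2) true).take 20))
        PySem.Dict.empty
      = ((texts.zip cas).foldl
          (fun st (p : String × Int) =>
            let c : Int := p.2
            let q :=
              if st.1.contains c then (st.1.modify c [] (fun ll => ll ++ [p.1]), st.2)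
              else (st.1.insert c [p.1], st.2.insert c PySem.Dict.empty)
            (q.1, q.2.modify c PySem.Dict.empty
              (fun cnt => (pvFilteredWords p.1).foldl
                (fun d w => d.modify w 0 (fun k => k + 1)) cnt)))
          (PySem.Dict.empty, PySem.Dict.empty)).2.items.foldl
          (fun m q => m.insert q.1 ((PySem.List.sorted q.2.items (fun r => r.2) true).take 20))
          PySem.Dict.empty := by
    rw [hitems]
    exact pvStage2 _
  have h2 : (map_texts_to_clusters texts cas).2 = (map_texts_to_clusters_alt texts cas).2 :=
    congrArg PySem.Dict.items hdicts
  exact Prod.ext h1 h2
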